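-- pv_equiv track=rewrite | github.com/fish77889401-svg/- | main.py | find_member_by_name
-- ===== SOURCE A (Python) =====
-- def find_member_by_name(g, name):
--     for mid, m in g["members"].items():
--         if name == m["name"]:
--             return mid
--     for mid, m in g["members"].items():
--         if name in m["name"]:
--             return mid
--     return None
-- ===== SOURCE B (Python) =====
-- def find_member_by_name(g, name):
--     # single scoring pass: keep the first member with the minimal rank
--     # (0 = exact name match, 1 = substring match, 2 = no match)
--     best_rank, best_mid = 2, None
--     for mid, m in g["members"].items():
--         n = m["name"]
--         rank = 0 if name == n else (1 if name in n else 2)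
--         if rank < best_rank:
--             best_rank, best_mid = rank, mid
--     return best_mid
-- ===== Notes on version B (the rewrite author's own statement) =====
-- stated objective: alternative
-- what changed: A's two sequential early-return scans are replaced by one full scoring pass that ranks every member (0 exact, 1 substring, 2 none) and keeps the first member of minimal rank; Pre_ excludes the inputs where A raises KeyError (no 'members' key or a member without a 'name' key reached before an exact match) and also the inputs where A returns via an exact match found before a member lacking 'name', since B's full scan itself raises KeyError there.
-- outside the precondition, e.g. on find_member_by_name({'members': {'1': {'name': 'x'}, '2': {}}}, 'x'): A returns '1', B raises KeyError
import Mathlib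
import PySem

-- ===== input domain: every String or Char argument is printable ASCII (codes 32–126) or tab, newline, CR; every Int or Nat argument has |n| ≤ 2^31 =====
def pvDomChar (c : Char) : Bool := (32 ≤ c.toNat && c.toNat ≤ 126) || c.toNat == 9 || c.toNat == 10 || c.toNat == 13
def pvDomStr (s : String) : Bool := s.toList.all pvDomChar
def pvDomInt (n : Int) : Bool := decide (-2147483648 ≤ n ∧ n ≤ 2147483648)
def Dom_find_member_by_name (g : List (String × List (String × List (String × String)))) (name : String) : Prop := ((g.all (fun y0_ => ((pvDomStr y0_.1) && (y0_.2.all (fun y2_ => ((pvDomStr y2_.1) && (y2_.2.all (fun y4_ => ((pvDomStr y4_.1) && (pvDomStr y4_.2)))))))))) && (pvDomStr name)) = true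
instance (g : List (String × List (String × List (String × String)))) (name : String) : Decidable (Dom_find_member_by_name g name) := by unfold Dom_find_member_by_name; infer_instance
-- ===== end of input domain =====

-- B replaces A's two early-return scans by one full scoring pass (rank 0/1/2) keeping the
-- first member of minimal rank — an alternative decomposition of the same O(n) task.

-- ===== PORT A =====
-- Python dict lookup d[k]: first match; none = KeyError (excluded by Pre_)
def pyLookup {α : Type} : List (String × α) → String → Option α
  | [], _ => none
  | (k, v) :: rest, key => if k == key then some v else pyLookup rest key

-- first loop: for mid, m in members.items(): if name == m["name"]: return mid
def fmbnExact (name : String) : List (String × List (String × String)) → Option String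
  | [] => none
  | (mid, m) :: rest =>
    match pyLookup m "name" with
    | none => none  -- KeyError in Python; excluded by Pre_
    | some n => if name == n then some mid else fmbnExact name rest

-- second loop: for mid, m in members.items(): if name in m["name"]: return mid
def fmbnSub (name : String) : List (String × List (String × String)) → Option String
  | [] => none
  | (mid, m) :: rest =>
    match pyLookup m "name" with
    | none => none  -- KeyError in Python; excluded by Pre_
    | some n => if PySem.Str.isIn name n then some mid else fmbnSub name rest

def find_member_by_name (g : List (String × List (String × List (String × String)))) (name : String) : Option String :=
  match pyLookup g "members" with
  | none => none  -- KeyError in Python; excluded by Pre_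
  | some members =>
    match fmbnExact name members with
    | some mid => some mid
    | none => fmbnSub name members

-- ===== PORT B =====
-- rank = 0 if name == n else (1 if name in n else 2)
def fmbnRank (name n : String) : Nat :=
  if name == n then 0 else if PySem.Str.isIn name n then 1 else 2

-- the scoring loop over members, carrying (best_rank, best_mid); a member dict
-- without a "name" key raises KeyError in Python → the whole result is none
def fmbnBest (name : String) : List (String × List (String × String)) → Nat × Option String → Option (Nat × Option String)
  | [], st => some st
  | (mid, m) :: rest, (br, bm) =>
    match (m.find? (fun p => p.1 == "name")).map Prod.snd with
    | none => none  -- KeyError in Python; excluded by Pre_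
    | some n =>
      let r := fmbnRank name n
      fmbnBest name rest (if r < br then (r, some mid) else (br, bm))

def find_member_by_name_alt (g : List (String × List (String × List (String × String)))) (name : String) : Option String :=
  match (g.find? (fun p => p.1 == "members")).map Prod.snd with
  | none => none  -- KeyError in Python; excluded by Pre_
  | some members =>
    match fmbnBest name members (2, none) with
    | none => none
    | some (_, bm) => bm

-- ===== PRECONDITION & SPEC =====
-- Pre_ excludes the inputs where A raises KeyError (no "members" key, or a member without a
-- "name" key reached before an exact match) AND the inputs where A returns via an exact match
-- found before a member lacking "name": on the latter B's full scan itself raises KeyError,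
-- so Pre_ requires every member dict to carry a "name" key.
def Pre_find_member_by_name (g : List (String × List (String × List (String × String)))) (name : String) : Prop :=
  "members" ∈ g.map Prod.fst ∧
  ∀ m ∈ ((g.find? (fun p => p.1 == "members")).map Prod.snd).getD [],
    "name" ∈ m.2.map Prod.fst
instance (g : List (String × List (String × List (String × String)))) (name : String) : Decidable (Pre_find_member_by_name g name) := by unfold Pre_find_member_by_name; infer_instance

def pvWitness_find_member_by_name : (List (String × List (String × List (String × String)))) × String :=
  ([("members", [("1", [("name", "alice")]), ("2", [("name", "bob")])])], "li")

def Spec_find_member_by_name (g : List (String × List (String × List (String × String)))) (name : String) (out : Option String) : Prop := out = find_member_by_name_alt g name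
instance (g : List (String × List (String × List (String × String)))) (name : String) (out : Option String) : Decidable (Spec_find_member_by_name g name out) := by unfold Spec_find_member_by_name; infer_instance

-- ===== CLAIM =====
def Claim_equal_find_member_by_name : Prop := ∀ (g : List (String × List (String × List (String × String)))) (name : String), Dom_find_member_by_name g name → Pre_find_member_by_name g name → Spec_find_member_by_name g name (find_member_by_name g name)

-- ===== LEMMAS AND PROOFS =====

theorem pyLookup_eq_find? {α : Type} (d : List (String × α)) (k : String) :
    pyLookup d k = (d.find? (fun p => p.1 == k)).map Prod.snd := by
  induction d with
  | nil => simp [pyLookup]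
  | cons p rest ih =>
    obtain ⟨k', v⟩ := p
    by_cases hk : k' == k <;> simp [pyLookup, List.find?, hk, ih]

theorem pyLookup_isSome {α : Type} (d : List (String × α)) (k : String) :
    (pyLookup d k).isSome ↔ k ∈ d.map Prod.fst := by
  induction d with
  | nil => simp [pyLookup]
  | cons p rest ih =>
    obtain ⟨k', v⟩ := p
    by_cases hk : k' = k
    · subst hk; simp [pyLookup]
    · simp [pyLookup, hk, ih, Ne.symm hk]

-- the scoring loop, on members that all carry a "name" key, ends at rank 0's bm if the
-- carried rank is already 0, else at the first exact match, else at bm if the carried rank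
-- is 1, else at the first substring match, else at bm.
theorem fmbnBest_eq (name : String) (M : List (String × List (String × String)))
    (h : ∀ m ∈ M, "name" ∈ m.2.map Prod.fst) (br : Nat) (hbr2 : br ≤ 2) (bm : Option String) :
    ∃ r', fmbnBest name M (br, bm) = some (r',
      if br = 0 then bm else
        (fmbnExact name M).or (if br = 1 then bm else (fmbnSub name M).or bm)) := by
  induction M generalizing br bm with
  | nil =>
    refine ⟨br, ?_⟩
    simp only [fmbnBest, fmbnExact, fmbnSub, Option.none_or]
    split_ifs <;> rfl
  | cons p rest ih =>
    obtain ⟨mid, m⟩ := p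
    have h0 : "name" ∈ m.map Prod.fst := h (mid, m) (by simp)
    obtain ⟨n, hn⟩ := Option.isSome_iff_exists.mp ((pyLookup_isSome m "name").mpr h0)
    rw [pyLookup_eq_find?] at hn
    have hn' : pyLookup m "name" = some n := by rw [pyLookup_eq_find?]; exact hn
    have hrest : ∀ m' ∈ rest, "name" ∈ m'.2.map Prod.fst := fun m' hm' => h m' (by simp [hm'])
    simp only [fmbnBest, hn, fmbnExact, fmbnSub, hn', fmbnRank]
    cases hb : (name == n) with
    | true =>
      simp only [if_true]
      by_cases hbr : br = 0
      · subst hbr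
        obtain ⟨r', hr⟩ := ih hrest 0 (by omega) bm
        rw [if_neg (by omega)]
        exact ⟨r', by simpa using hr⟩
      · obtain ⟨r', hr⟩ := ih hrest 0 (by omega) (some mid)
        rw [if_pos (by omega)]
        exact ⟨r', by simp [hr, hbr]⟩
    | false =>
      simp only [Bool.false_eq_true, if_false]
      cases hs : PySem.Str.isIn name n with
      | true =>
        simp only [if_true]
        match br with
        | 0 =>
          obtain ⟨r', hr⟩ := ih hrest 0 (by omega) bm
          rw [if_neg (by omega)]
          exact ⟨r', by simpa using hr⟩
        | 1 =>
          obtain ⟨r', hr⟩ := ih hrest 1 (by omega) bm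
          rw [if_neg (by omega)]
          refine ⟨r', ?_⟩
          rw [hr]
          cases fmbnExact name rest <;> simp
        | (k+2) =>
          obtain ⟨r', hr⟩ := ih hrest 1 (by omega) (some mid)
          rw [if_pos (by omega)]
          refine ⟨r', ?_⟩
          rw [hr]
          cases fmbnExact name rest <;> simp
      | false =>
        simp only [Bool.false_eq_true, if_false]
        obtain ⟨r', hr⟩ := ih hrest br hbr2 bm
        rw [if_neg (by omega)]
        refine ⟨r', ?_⟩
        rw [hr]

theorem find_member_by_name_spec : Claim_equal_find_member_by_name := by
  intro g name _hd hpre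
  unfold Spec_find_member_by_name find_member_by_name find_member_by_name_alt
  obtain ⟨h1, h2⟩ := hpre
  cases hM : pyLookup g "members" with
  | none =>
    exact absurd ((pyLookup_isSome g "members").mpr h1) (by simp [hM])
  | some M =>
    have hMf : (g.find? (fun p => p.1 == "members")).map Prod.snd = some M := by
      rw [← pyLookup_eq_find?, hM]
    have h2' : ∀ m ∈ M, "name" ∈ m.2.map Prod.fst := by
      intro m hm; exact h2 m (by rw [hMf]; simpa using hm)
    simp only [hMf]
    obtain ⟨r', hr⟩ := fmbnBest_eq name M h2' 2 (by omega) none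
    rw [hr]
    cases fmbnExact name M <;> cases fmbnSub name M <;> simp
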